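-- pv_equiv track=rewrite | github.com/martiph/subnet-calculator | subnet_calculator.py | convert_cidr_to_subnet
-- ===== SOURCE A (Python) =====
-- def convert_cidr_to_subnet(cidr):
--     subnet_bin = ''
--     subnet = []
--     subnet_bin = subnet_bin.ljust(cidr, "1")
--     subnet_bin = subnet_bin.ljust(32, "0")
--     for i in range(0, 32, 8):
--         subnet.append(str(int(subnet_bin[i : i+8],2)))
--     subnet_mask = '.'.join(subnet)
--     return subnet_mask
-- ===== SOURCE B (Python) =====
-- def convert_cidr_to_subnet(cidr):
--     bits = min(max(cidr, 0), 32)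
--     mask = (0xFFFFFFFF << (32 - bits)) & 0xFFFFFFFF
--     return '.'.join(str((mask >> s) & 255) for s in (24, 16, 8, 0))
-- ===== Notes on version B (the rewrite author's own statement) =====
-- stated objective: idiomatic
-- what changed: Replaces the padded bit-string construction and per-octet substring slicing with a single machine-word mask built by clamping the prefix and shifting, extracting each octet with shift-and-mask arithmetic.
import Mathlib
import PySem

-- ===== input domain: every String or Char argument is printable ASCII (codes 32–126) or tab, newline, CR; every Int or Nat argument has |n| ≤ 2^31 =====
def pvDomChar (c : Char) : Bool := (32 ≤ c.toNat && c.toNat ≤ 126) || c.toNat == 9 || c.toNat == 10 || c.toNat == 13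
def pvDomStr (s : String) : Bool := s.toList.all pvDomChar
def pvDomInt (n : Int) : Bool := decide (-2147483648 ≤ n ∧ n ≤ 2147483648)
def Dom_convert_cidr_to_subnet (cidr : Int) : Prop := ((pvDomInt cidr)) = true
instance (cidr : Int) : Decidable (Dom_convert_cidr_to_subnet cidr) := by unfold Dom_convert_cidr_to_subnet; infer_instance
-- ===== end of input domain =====

-- B computes the mask as one 32-bit integer via clamp/shift arithmetic instead of
-- building and slicing a padded bit-string (idiomatic; same exact results).


-- ===== PORT A =====
-- str.ljust(n, c) ported by hand: pad on the right with c up to width n (exact: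
-- a negative/small n pads nothing, matching Python since Int.toNat clamps at 0).
def pyLjust (s : List Char) (n : Int) (c : Char) : List Char :=
  s ++ List.replicate (n.toNat - s.length) c

-- int(s, 2) ported by hand; exact on strings of '0'/'1', which is all A feeds it.
def bin2int (s : List Char) : Int :=
  s.foldl (fun a c => 2 * a + (if c = '1' then 1 else 0)) 0

def convert_cidr_to_subnet (cidr : Int) : String :=
  let subnet_bin := pyLjust (pyLjust [] cidr '1') 32 '0'
  let subnet := (PySem.List.pyRange 0 32 8).foldl
    (fun acc i =>
      acc ++ [PySem.Int.toStr (bin2int (PySem.List.slice subnet_bin (some i) (some (i + 8))))]) []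
  PySem.Str.join "." subnet

-- ===== PORT B =====
def convert_cidr_to_subnet_alt (cidr : Int) : String :=
  let bits : Nat := (min (max cidr 0) 32).toNat
  let mask : Nat := (0xFFFFFFFF <<< (32 - bits)) &&& 0xFFFFFFFF
  PySem.Str.join "." (([24, 16, 8, 0] : List Nat).map
    (fun s => PySem.Int.toStr (Int.ofNat ((mask >>> s) &&& 255))))

-- ===== PRECONDITION & SPEC =====
def Spec_convert_cidr_to_subnet (cidr : Int) (out : String) : Prop := out = convert_cidr_to_subnet_alt cidr
instance (cidr : Int) (out : String) : Decidable (Spec_convert_cidr_to_subnet cidr out) := by unfold Spec_convert_cidr_to_subnet; infer_instance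

-- ===== CLAIM (what is proved, stated in full; the proofs are below) =====
def Claim_equal_convert_cidr_to_subnet : Prop := ∀ (cidr : Int), Dom_convert_cidr_to_subnet cidr → Spec_convert_cidr_to_subnet cidr (convert_cidr_to_subnet cidr)

-- ===== LEMMAS AND PROOFS =====

theorem A_nonpos (cidr : Int) (h : cidr ≤ 0) : convert_cidr_to_subnet cidr = "0.0.0.0" := by
  simp only [convert_cidr_to_subnet, pyLjust, Int.toNat_of_nonpos h]
  decide

theorem B_nonpos (cidr : Int) (h : cidr ≤ 0) : convert_cidr_to_subnet_alt cidr = "0.0.0.0" := by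
  simp only [convert_cidr_to_subnet_alt, max_eq_right h]
  decide

theorem A_ge32 (cidr : Int) (h : 32 ≤ cidr) : convert_cidr_to_subnet cidr = "255.255.255.255" := by
  have hn : 32 ≤ cidr.toNat := by omega
  have hbin : pyLjust (pyLjust [] cidr '1') 32 '0' = List.replicate cidr.toNat '1' := by
    simp [pyLjust]
    omega
  have key : ∀ (i : Int), 0 ≤ i → i.toNat + 8 ≤ 32 →
      PySem.List.slice (List.replicate cidr.toNat '1') (some i) (some (i + 8))
        = List.replicate 8 '1' := by
    intro i hi h8
    rw [PySem.List.slice_toNat _ hi (by omega)]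
    rw [List.drop_replicate, List.take_replicate]
    congr 1
    omega
  have hr : PySem.List.pyRange 0 32 8 = [0, 8, 16, 24] := by decide
  simp only [convert_cidr_to_subnet, hbin, hr, List.foldl]
  rw [key 0 (by norm_num) (by norm_num), key 8 (by norm_num) (by decide),
      key 16 (by norm_num) (by decide), key 24 (by norm_num) (by decide)]
  decide

theorem B_ge32 (cidr : Int) (h : 32 ≤ cidr) : convert_cidr_to_subnet_alt cidr = "255.255.255.255" := by
  simp only [convert_cidr_to_subnet_alt, show min (max cidr 0) 32 = 32 by omega]
  decide

set_option maxHeartbeats 1000000 in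
theorem AB_mid : ∀ n : Nat, n < 33 →
    convert_cidr_to_subnet (n : Int) = convert_cidr_to_subnet_alt (n : Int) := by decide

-- ===== VERDICT (by name: the statement is the Claim_ definition above) =====
theorem convert_cidr_to_subnet_spec : Claim_equal_convert_cidr_to_subnet := by
  intro cidr _
  unfold Spec_convert_cidr_to_subnet
  rcases (by omega : cidr ≤ 0 ∨ 0 < cidr) with h | h
  · rw [A_nonpos cidr h, B_nonpos cidr h]
  · rcases (by omega : 32 ≤ cidr ∨ cidr < 32) with h2 | h2
    · rw [A_ge32 cidr h2, B_ge32 cidr h2]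
    · obtain ⟨n, hcn, hlt⟩ : ∃ n : Nat, cidr = (n : Int) ∧ n < 33 :=
        ⟨cidr.toNat, by omega, by omega⟩
      rw [hcn]
      exact AB_mid n hlt
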